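-- pv_equiv track=rewrite | github.com/alexandra-adamchyk/zpi-zp41_tfdjango_AdamchykOleksandra_KPI_2026 | vision/services/inference.py | map_label_to_category
-- ===== SOURCE A (Python) =====
-- def map_label_to_category(label: str) -> str:
--     label = label.lower()
--
--     cat_keywords = [
--         "cat", "kitten", "tabby", "lynx", "tiger", "lion",
--         "jaguar", "leopard", "cheetah", "cougar", "snow_leopard"
--     ]
--
--     dog_keywords = [
--         "dog", "puppy", "retriever", "terrier", "spaniel", "hound",
--         "shepherd", "poodle", "bulldog", "beagle", "chihuahua",
--         "pug", "boxer", "doberman", "rottweiler", "collie",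
--         "husky", "malamute", "mastiff", "dachshund", "setter",
--         "pinscher", "corgi"
--     ]
--
--     bird_keywords = [
--         "bird", "hen", "cock", "eagle", "owl", "vulture", "kite",
--         "parrot", "finch", "robin", "magpie", "jay", "bulbul",
--         "ostrich"
--     ]
--
--     car_keywords = [
--         "car", "cab", "jeep", "limousine", "minivan",
--         "sports_car", "convertible", "racer", "model_t"
--     ]
--
--     bicycle_keywords = [
--         "bicycle", "bike", "mountain_bike", "unicycle"
--     ]
--
--     motorcycle_keywords = [
--         "motorcycle", "moped", "motor_scooter"
--     ]
--
--     person_keywords = [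
--         "person", "man", "woman", "boy", "girl", "bride", "groom",
--         "scuba_diver"
--     ]
--
--     if any(word in label for word in cat_keywords):
--         return "Cat"
--
--     if any(word in label for word in dog_keywords):
--         return "Dog"
--
--     if any(word in label for word in bird_keywords):
--         return "Bird"
--
--     if any(word in label for word in car_keywords):
--         return "Car"
--
--     if any(word in label for word in bicycle_keywords):
--         return "Bicycle"
--
--     if any(word in label for word in motorcycle_keywords):
--         return "Motorcycle"
--
--     if any(word in label for word in person_keywords):
--         return "Person"
--
--     return "Other"
-- ===== SOURCE B (Python) =====
-- # B: invert the search: hash every bounded-length substring of the label into one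
-- # keyword->priority dict and keep the minimum priority, instead of scanning all
-- # ~70 keywords against the label (different algorithm: substring enumeration + hash
-- # lookup, O(len(label)*MAXLEN) vs O(total keyword chars * len(label))).
--
-- CATS = ["Cat", "Dog", "Bird", "Car", "Bicycle", "Motorcycle", "Person"]
--
-- KW = {}
-- for _p, _ws in enumerate([
--     ["cat", "kitten", "tabby", "lynx", "tiger", "lion",
--      "jaguar", "leopard", "cheetah", "cougar", "snow_leopard"],
--     ["dog", "puppy", "retriever", "terrier", "spaniel", "hound",
--      "shepherd", "poodle", "bulldog", "beagle", "chihuahua",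
--      "pug", "boxer", "doberman", "rottweiler", "collie",
--      "husky", "malamute", "mastiff", "dachshund", "setter",
--      "pinscher", "corgi"],
--     ["bird", "hen", "cock", "eagle", "owl", "vulture", "kite",
--      "parrot", "finch", "robin", "magpie", "jay", "bulbul", "ostrich"],
--     ["car", "cab", "jeep", "limousine", "minivan",
--      "sports_car", "convertible", "racer", "model_t"],
--     ["bicycle", "bike", "mountain_bike", "unicycle"],
--     ["motorcycle", "moped", "motor_scooter"],
--     ["person", "man", "woman", "boy", "girl", "bride", "groom",
--      "scuba_diver"],
-- ]):
--     for _w in _ws: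
--         KW[_w] = _p
--
-- MAXLEN = 13  # length of the longest keyword ("motor_scooter")
--
--
-- def map_label_to_category(label: str) -> str:
--     label = label.lower()
--     n = len(label)
--     best = 7
--     for i in range(n):
--         for j in range(i + 1, min(i + MAXLEN, n) + 1):
--             best = min(best, KW.get(label[i:j], 7))
--     return CATS[best] if best < 7 else "Other"
-- ===== Notes on version B (the rewrite author's own statement) =====
-- stated objective: alternative
-- what changed: Inverts the search: instead of testing each of the ~70 keywords for membership in the label, B enumerates every substring of the lowercased label up to the maximum keyword length (13), looks each up in a single keyword-to-priority dictionary, and keeps the minimum priority, returning that category or 'Other'.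
import Mathlib
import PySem

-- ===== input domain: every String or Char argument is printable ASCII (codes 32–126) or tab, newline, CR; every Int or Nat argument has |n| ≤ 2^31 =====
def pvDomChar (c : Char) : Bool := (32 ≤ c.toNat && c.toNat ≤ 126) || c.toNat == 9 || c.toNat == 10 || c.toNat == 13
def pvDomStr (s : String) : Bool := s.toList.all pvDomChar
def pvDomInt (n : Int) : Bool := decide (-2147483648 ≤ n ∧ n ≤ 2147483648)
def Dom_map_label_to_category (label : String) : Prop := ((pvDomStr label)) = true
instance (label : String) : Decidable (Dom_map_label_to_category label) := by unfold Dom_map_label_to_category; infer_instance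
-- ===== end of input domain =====

-- B inverts the search: it looks up every bounded-length substring of the label in one
-- keyword->priority dictionary and keeps the minimum priority, instead of scanning every
-- keyword of every category against the label (alternative algorithm, same result).

-- ===== PORT A =====
def map_label_to_category (label : String) : String :=
  let label := PySem.Str.lower label
  let cat_keywords := ["cat", "kitten", "tabby", "lynx", "tiger", "lion",
    "jaguar", "leopard", "cheetah", "cougar", "snow_leopard"]
  let dog_keywords := ["dog", "puppy", "retriever", "terrier", "spaniel", "hound",
    "shepherd", "poodle", "bulldog", "beagle", "chihuahua",
    "pug", "boxer", "doberman", "rottweiler", "collie",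
    "husky", "malamute", "mastiff", "dachshund", "setter",
    "pinscher", "corgi"]
  let bird_keywords := ["bird", "hen", "cock", "eagle", "owl", "vulture", "kite",
    "parrot", "finch", "robin", "magpie", "jay", "bulbul", "ostrich"]
  let car_keywords := ["car", "cab", "jeep", "limousine", "minivan",
    "sports_car", "convertible", "racer", "model_t"]
  let bicycle_keywords := ["bicycle", "bike", "mountain_bike", "unicycle"]
  let motorcycle_keywords := ["motorcycle", "moped", "motor_scooter"]
  let person_keywords := ["person", "man", "woman", "boy", "girl", "bride", "groom",
    "scuba_diver"]
  if cat_keywords.any (fun word => PySem.Str.isIn word label) then "Cat"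
  else if dog_keywords.any (fun word => PySem.Str.isIn word label) then "Dog"
  else if bird_keywords.any (fun word => PySem.Str.isIn word label) then "Bird"
  else if car_keywords.any (fun word => PySem.Str.isIn word label) then "Car"
  else if bicycle_keywords.any (fun word => PySem.Str.isIn word label) then "Bicycle"
  else if motorcycle_keywords.any (fun word => PySem.Str.isIn word label) then "Motorcycle"
  else if person_keywords.any (fun word => PySem.Str.isIn word label) then "Person"
  else "Other"

-- ===== PORT B =====
-- CATS
def pvCats : List String := ["Cat", "Dog", "Bird", "Car", "Bicycle", "Motorcycle", "Person"]

-- KW: keyword -> priority index (the dict literal from Source B)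
def pvKW : PySem.Dict String Nat := PySem.Dict.ofList
  [("cat", 0), ("kitten", 0), ("tabby", 0), ("lynx", 0), ("tiger", 0), ("lion", 0),
   ("jaguar", 0), ("leopard", 0), ("cheetah", 0), ("cougar", 0), ("snow_leopard", 0),
   ("dog", 1), ("puppy", 1), ("retriever", 1), ("terrier", 1), ("spaniel", 1), ("hound", 1),
   ("shepherd", 1), ("poodle", 1), ("bulldog", 1), ("beagle", 1), ("chihuahua", 1),
   ("pug", 1), ("boxer", 1), ("doberman", 1), ("rottweiler", 1), ("collie", 1),
   ("husky", 1), ("malamute", 1), ("mastiff", 1), ("dachshund", 1), ("setter", 1),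
   ("pinscher", 1), ("corgi", 1),
   ("bird", 2), ("hen", 2), ("cock", 2), ("eagle", 2), ("owl", 2), ("vulture", 2), ("kite", 2),
   ("parrot", 2), ("finch", 2), ("robin", 2), ("magpie", 2), ("jay", 2), ("bulbul", 2),
   ("ostrich", 2),
   ("car", 3), ("cab", 3), ("jeep", 3), ("limousine", 3), ("minivan", 3),
   ("sports_car", 3), ("convertible", 3), ("racer", 3), ("model_t", 3),
   ("bicycle", 4), ("bike", 4), ("mountain_bike", 4), ("unicycle", 4),
   ("motorcycle", 5), ("moped", 5), ("motor_scooter", 5),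
   ("person", 6), ("man", 6), ("woman", 6), ("boy", 6), ("girl", 6), ("bride", 6),
   ("groom", 6), ("scuba_diver", 6)]

-- MAXLEN = 13 ("motor_scooter")
def map_label_to_category_alt (label : String) : String :=
  let label := PySem.Str.lower label
  let n : Int := PySem.Str.len label
  let best : Nat := (PySem.List.pyRange 0 n 1).foldl (fun best i =>
      (PySem.List.pyRange (i + 1) (min (i + 13) n + 1) 1).foldl (fun best j =>
        min best (PySem.Dict.getD pvKW (PySem.Str.slice label (some i) (some j)) 7)) best) 7
  if best < 7 then pvCats.getD best "Other" else "Other"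

-- ===== PRECONDITION & SPEC =====
def Spec_map_label_to_category (label : String) (out : String) : Prop := out = map_label_to_category_alt label
instance (label : String) (out : String) : Decidable (Spec_map_label_to_category label out) := by unfold Spec_map_label_to_category; infer_instance

-- ===== CLAIM (what is proved, stated in full; the proofs are below) =====
def Claim_equal_map_label_to_category : Prop := ∀ (label : String), Dom_map_label_to_category label → Spec_map_label_to_category label (map_label_to_category label)

-- ===== LEMMAS AND PROOFS =====

-- A's seven keyword lists, indexed by priority (proof-side view of A's conditions)
def pvKws : List (List String) :=
  [["cat", "kitten", "tabby", "lynx", "tiger", "lion",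
    "jaguar", "leopard", "cheetah", "cougar", "snow_leopard"],
   ["dog", "puppy", "retriever", "terrier", "spaniel", "hound",
    "shepherd", "poodle", "bulldog", "beagle", "chihuahua",
    "pug", "boxer", "doberman", "rottweiler", "collie",
    "husky", "malamute", "mastiff", "dachshund", "setter",
    "pinscher", "corgi"],
   ["bird", "hen", "cock", "eagle", "owl", "vulture", "kite",
    "parrot", "finch", "robin", "magpie", "jay", "bulbul", "ostrich"],
   ["car", "cab", "jeep", "limousine", "minivan",
    "sports_car", "convertible", "racer", "model_t"],
   ["bicycle", "bike", "mountain_bike", "unicycle"],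
   ["motorcycle", "moped", "motor_scooter"],
   ["person", "man", "woman", "boy", "girl", "bride", "groom",
    "scuba_diver"]]

def pvM (L : String) (p : Nat) : Bool := (pvKws.getD p []).any (fun word => PySem.Str.isIn word L)

def pvAof (L : String) : String :=
  if pvM L 0 then "Cat"
  else if pvM L 1 then "Dog"
  else if pvM L 2 then "Bird"
  else if pvM L 3 then "Car"
  else if pvM L 4 then "Bicycle"
  else if pvM L 5 then "Motorcycle"
  else if pvM L 6 then "Person"
  else "Other"

def pvBest (L : String) : Nat :=
  (PySem.List.pyRange 0 (PySem.Str.len L) 1).foldl (fun best i =>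
    (PySem.List.pyRange (i + 1) (min (i + 13) (PySem.Str.len L) + 1) 1).foldl (fun best j =>
      min best (PySem.Dict.getD pvKW (PySem.Str.slice L (some i) (some j)) 7)) best) 7

lemma pvA_eq (label : String) : map_label_to_category label = pvAof (PySem.Str.lower label) := rfl

lemma pvAlt_eq (label : String) :
    map_label_to_category_alt label =
      (if pvBest (PySem.Str.lower label) < 7
        then pvCats.getD (pvBest (PySem.Str.lower label)) "Other" else "Other") := rfl

-- generic min-fold lemmas
lemma pvFold_le_init (f : Int → Nat) (l : List Int) (b : Nat) :
    l.foldl (fun b x => min b (f x)) b ≤ b := by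
  induction l generalizing b with
  | nil => simp
  | cons x xs ih => exact le_trans (ih _) (min_le_left _ _)

lemma pvFold_le_mem (f : Int → Nat) (l : List Int) : ∀ (b : Nat) (x : Int), x ∈ l →
    l.foldl (fun b x => min b (f x)) b ≤ f x := by
  induction l with
  | nil => intro b x hx; cases hx
  | cons y ys ih =>
    intro b x hx
    rcases List.mem_cons.mp hx with h | h
    · subst h
      exact le_trans (pvFold_le_init f ys _) (min_le_right _ _)
    · exact ih _ _ h

lemma pvFold_cases (f : Int → Nat) (l : List Int) (b : Nat) :
    l.foldl (fun b x => min b (f x)) b = b ∨ ∃ x ∈ l, l.foldl (fun b x => min b (f x)) b = f x := by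
  induction l generalizing b with
  | nil => exact Or.inl rfl
  | cons y ys ih =>
    simp only [List.foldl_cons]
    rcases ih (min b (f y)) with h | ⟨x, hx, h⟩
    · rcases min_cases b (f y) with ⟨he, _⟩ | ⟨he, _⟩
      · exact Or.inl (by rw [h, he])
      · exact Or.inr ⟨y, List.mem_cons_self, by rw [h, he]⟩
    · exact Or.inr ⟨x, List.mem_cons_of_mem _ hx, h⟩

-- nested versions
lemma pvNest_le_init (g : Int → Int → Nat) (h : Int → List Int) (l : List Int) (b : Nat) :
    l.foldl (fun b i => (h i).foldl (fun b j => min b (g i j)) b) b ≤ b := by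
  induction l generalizing b with
  | nil => simp
  | cons x xs ih => exact le_trans (ih _) (pvFold_le_init (g x) (h x) b)

lemma pvNest_le_mem (g : Int → Int → Nat) (h : Int → List Int) (l : List Int) : ∀ (b : Nat)
    (i j : Int), i ∈ l → j ∈ h i →
    l.foldl (fun b i => (h i).foldl (fun b j => min b (g i j)) b) b ≤ g i j := by
  induction l with
  | nil => intro b i j hi _; cases hi
  | cons y ys ih =>
    intro b i j hi hj
    rcases List.mem_cons.mp hi with hh | hh
    · subst hh
      exact le_trans (pvNest_le_init g h ys _) (pvFold_le_mem (g i) (h i) b j hj)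
    · exact ih _ _ _ hh hj

lemma pvNest_cases (g : Int → Int → Nat) (h : Int → List Int) (l : List Int) (b : Nat) :
    l.foldl (fun b i => (h i).foldl (fun b j => min b (g i j)) b) b = b ∨
      ∃ i ∈ l, ∃ j ∈ h i,
        l.foldl (fun b i => (h i).foldl (fun b j => min b (g i j)) b) b = g i j := by
  induction l generalizing b with
  | nil => exact Or.inl rfl
  | cons y ys ih =>
    simp only [List.foldl_cons]
    rcases ih ((h y).foldl (fun b j => min b (g y j)) b) with hcase | ⟨i, hi, j, hj, hcase⟩
    · rcases pvFold_cases (g y) (h y) b with he | ⟨j, hj, he⟩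
      · exact Or.inl (by rw [hcase, he])
      · exact Or.inr ⟨y, List.mem_cons_self, j, hj, by rw [hcase, he]⟩
    · exact Or.inr ⟨i, List.mem_cons_of_mem _ hi, j, hj, hcase⟩

-- finite facts about the literal dict / lists (checked by computation)
set_option maxRecDepth 100000 in
lemma pvF1 : ∀ kv ∈ pvKW.items, kv.2 < 7 ∧ kv.1 ∈ pvKws.getD kv.2 [] := by decide

set_option maxRecDepth 100000 in
lemma pvF2 : ∀ p < 7, ∀ w ∈ pvKws.getD p [],
    PySem.Dict.getD pvKW w 7 = p ∧ 1 ≤ w.toList.length ∧ w.toList.length ≤ 13 := by decide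

-- a slice hit is a substring
lemma pv_isIn_of_slice (L w : String) (i j : Int) (h0 : 0 ≤ i) (h0j : 0 ≤ j)
    (hs : PySem.Str.slice L (some i) (some j) = w) :
    PySem.Str.isIn w L = true := by
  rw [PySem.Str.isIn_iff_infix, ← hs]
  have ht : (PySem.Str.slice L (some i) (some j)).toList
      = (L.toList.drop i.toNat).take (j.toNat - i.toNat) := by
    rw [PySem.Str.toList_slice, PySem.Chars.slice_eq_listSlice,
      PySem.List.slice_toNat _ h0 h0j]
  rw [ht]
  exact ((List.take_prefix _ _).isInfix).trans ((List.drop_suffix _ _).isInfix)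

-- a substring of bounded length is hit by some admissible (i, j) pair
lemma pv_slice_of_isIn (L w : String) (h1 : 1 ≤ w.toList.length) (h13 : w.toList.length ≤ 13)
    (h : PySem.Str.isIn w L = true) :
    ∃ i j : Int, (0 ≤ i ∧ i < (L.toList.length : Int)) ∧
      (i + 1 ≤ j ∧ j ≤ min (i + 13) (L.toList.length : Int)) ∧
      PySem.Str.slice L (some i) (some j) = w := by
  obtain ⟨t, u, htu⟩ := (PySem.Str.isIn_iff_infix w L).mp h
  have hlen := congrArg List.length htu
  simp only [List.length_append] at hlen
  refine ⟨(t.length : Int), ((t.length + w.toList.length : Nat) : Int), ?_, ?_, ?_⟩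
  · constructor
    · exact Int.natCast_nonneg _
    · omega
  · constructor
    · omega
    · omega
  · have ht : (PySem.Str.slice L (some (t.length : Int))
        (some ((t.length + w.toList.length : Nat) : Int))).toList = w.toList := by
      rw [PySem.Str.toList_slice, PySem.Chars.slice_eq_listSlice,
        PySem.List.slice_natCast]
      have hd : L.toList.drop t.length = w.toList ++ u := by
        rw [← htu, List.append_assoc, List.drop_left]
      rw [hd]
      have : t.length + w.toList.length - t.length = w.toList.length := by omega
      rw [this, List.take_left]
    exact String.toList_inj.mp ht

-- characterisation of pvBest
lemma pvBest_le (L : String) (p : Nat) (hp : p < 7) (hm : pvM L p = true) : pvBest L ≤ p := by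
  unfold pvM at hm
  rw [List.any_eq_true] at hm
  obtain ⟨w, hwmem, hin⟩ := hm
  obtain ⟨hgd, hl1, hl13⟩ := pvF2 p hp w hwmem
  obtain ⟨i, j, ⟨hi0, hin'⟩, ⟨hj1, hjmin⟩, hs⟩ := pv_slice_of_isIn L w hl1 hl13 hin
  have hmem1 : i ∈ PySem.List.pyRange 0 (PySem.Str.len L) 1 := by
    rw [PySem.List.mem_pyRange_one]
    simp only [PySem.Str.len_eq]
    exact ⟨hi0, by exact_mod_cast hin'⟩
  have hmem2 : j ∈ PySem.List.pyRange (i + 1) (min (i + 13) (PySem.Str.len L) + 1) 1 := by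
    rw [PySem.List.mem_pyRange_one]
    simp only [PySem.Str.len_eq]
    constructor
    · exact hj1
    · have : j ≤ min (i + 13) ((L.toList.length : Int)) := hjmin
      omega
  have hle := pvNest_le_mem
    (fun i j => PySem.Dict.getD pvKW (PySem.Str.slice L (some i) (some j)) 7)
    (fun i => PySem.List.pyRange (i + 1) (min (i + 13) (PySem.Str.len L) + 1) 1)
    (PySem.List.pyRange 0 (PySem.Str.len L) 1) 7 i j hmem1 hmem2
  calc pvBest L ≤ PySem.Dict.getD pvKW (PySem.Str.slice L (some i) (some j)) 7 := hle
    _ = p := by rw [hs, hgd]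

lemma pvBest_le7 (L : String) : pvBest L ≤ 7 :=
  pvNest_le_init _ _ _ _

lemma pvBest_hit (L : String) (h : pvBest L < 7) : pvM L (pvBest L) = true := by
  rcases pvNest_cases
      (fun i j => PySem.Dict.getD pvKW (PySem.Str.slice L (some i) (some j)) 7)
      (fun i => PySem.List.pyRange (i + 1) (min (i + 13) (PySem.Str.len L) + 1) 1)
      (PySem.List.pyRange 0 (PySem.Str.len L) 1) 7 with h7 | ⟨i, hi, j, hj, heq⟩
  · exfalso
    have : pvBest L = 7 := h7
    omega
  · have heq' : pvBest L = PySem.Dict.getD pvKW (PySem.Str.slice L (some i) (some j)) 7 := heq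
    set k := PySem.Str.slice L (some i) (some j) with hk
    obtain ⟨v, hv⟩ : ∃ v, PySem.Dict.get? pvKW k = some v := by
      rcases hg : PySem.Dict.get? pvKW k with _ | v
      · exfalso
        rw [PySem.Dict.getD_eq_get?_getD, hg] at heq'
        simp at heq'
        omega
      · exact ⟨v, rfl⟩
    have hbv : pvBest L = v := by
      rw [heq', PySem.Dict.getD_eq_get?_getD, hv]
      rfl
    have hmem := PySem.Dict.mem_items_of_get?_eq_some pvKW hv
    obtain ⟨hv7, hkin⟩ := pvF1 _ hmem
    rw [PySem.List.mem_pyRange_one] at hi hj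
    have hiin : PySem.Str.isIn k L = true := by
      refine pv_isIn_of_slice L k i j hi.1 (by omega) rfl
    unfold pvM
    rw [List.any_eq_true]
    exact ⟨k, by rw [hbv]; exact hkin, hiin⟩

-- ===== VERDICT (by name: the statement is the Claim_ definition above) =====
theorem map_label_to_category_spec : Claim_equal_map_label_to_category := by
  intro label _
  unfold Spec_map_label_to_category
  rw [pvA_eq label, pvAlt_eq label]
  generalize (PySem.Str.lower label) = L
  obtain ⟨b, hbdef⟩ : ∃ x, x = pvBest L := ⟨_, rfl⟩
  rw [← hbdef]
  have hle7 : b ≤ 7 := hbdef ▸ pvBest_le7 L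
  have hub : ∀ p, p < 7 → pvM L p = true → b ≤ p := fun p hp hm => hbdef ▸ pvBest_le L p hp hm
  have hhit : b < 7 → pvM L b = true := fun hb => by
    have := pvBest_hit L (hbdef ▸ hb)
    rwa [← hbdef] at this
  unfold pvAof
  by_cases h0 : pvM L 0 = true
  · have hb0 : b = 0 := Nat.le_zero.mp (hub 0 (by omega) h0)
    simp [h0, hb0, pvCats]
  by_cases h1 : pvM L 1 = true
  · have hb : b = 1 := by
      have := hub 1 (by omega) h1
      rcases Nat.lt_or_ge b 1 with hlt | hge
      · exfalso; have hm := hhit (by omega); interval_cases b <;> simp_all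
      · omega
    simp [h0, h1, hb, pvCats]
  by_cases h2 : pvM L 2 = true
  · have hb : b = 2 := by
      have := hub 2 (by omega) h2
      rcases Nat.lt_or_ge b 2 with hlt | hge
      · exfalso; have hm := hhit (by omega); interval_cases b <;> simp_all
      · omega
    simp [h0, h1, h2, hb, pvCats]
  by_cases h3 : pvM L 3 = true
  · have hb : b = 3 := by
      have := hub 3 (by omega) h3
      rcases Nat.lt_or_ge b 3 with hlt | hge
      · exfalso; have hm := hhit (by omega); interval_cases b <;> simp_all
      · omega
    simp [h0, h1, h2, h3, hb, pvCats]
  by_cases h4 : pvM L 4 = true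
  · have hb : b = 4 := by
      have := hub 4 (by omega) h4
      rcases Nat.lt_or_ge b 4 with hlt | hge
      · exfalso; have hm := hhit (by omega); interval_cases b <;> simp_all
      · omega
    simp [h0, h1, h2, h3, h4, hb, pvCats]
  by_cases h5 : pvM L 5 = true
  · have hb : b = 5 := by
      have := hub 5 (by omega) h5
      rcases Nat.lt_or_ge b 5 with hlt | hge
      · exfalso; have hm := hhit (by omega); interval_cases b <;> simp_all
      · omega
    simp [h0, h1, h2, h3, h4, h5, hb, pvCats]
  by_cases h6 : pvM L 6 = true
  · have hb : b = 6 := by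
      have := hub 6 (by omega) h6
      rcases Nat.lt_or_ge b 6 with hlt | hge
      · exfalso; have hm := hhit (by omega); interval_cases b <;> simp_all
      · omega
    simp [h0, h1, h2, h3, h4, h5, h6, hb, pvCats]
  · have hb : b = 7 := by
      rcases Nat.lt_or_ge b 7 with hlt | hge
      · exfalso; have hm := hhit hlt; interval_cases b <;> simp_all
      · omega
    simp [h0, h1, h2, h3, h4, h5, h6, hb]
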